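-- pv_equiv track=rewrite | github.com/cirosantilli/project-euler-solutions | solvers/715.py | build_values_and_index
-- ===== SOURCE A (Python) =====
-- from math import isqrt
--
-- def build_values_and_index(N: int):
--     """
--     Build the standard list of distinct values of floor(N / i), plus 1..sqrt(N),
--     merged into one descending unique list.
--
--     Also build index maps:
--       - idx_small[x] for x <= sqrt(N)
--       - idx_large[N//x] for x > sqrt(N)
--     """
--     root = isqrt(N)
--
--     # Distinct floor divisions, descending.
--     large = []
--     i = 1
--     while i <= N:
--         v = N // i
--         large.append(v)
--         i = N // v + 1
--
--     small = list(range(root, 0, -1))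
--
--     # Merge descending unique
--     values = []
--     ia = ib = 0
--     la = len(large)
--     lb = len(small)
--     append = values.append
--     while ia < la and ib < lb:
--         a = large[ia]
--         b = small[ib]
--         if a > b:
--             append(a)
--             ia += 1
--         elif a < b:
--             append(b)
--             ib += 1
--         else:
--             append(a)
--             ia += 1
--             ib += 1
--     if ia < la:
--         values.extend(large[ia:])
--     if ib < lb:
--         values.extend(small[ib:])
--
--     idx_small = [0] * (root + 1)
--     idx_large = [0] * (root + 1)
--     for idx, v in enumerate(values):
--         if v <= root:
--             idx_small[v] = idx
--         else:
--             idx_large[N // v] = idx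
--
--     return values, root, idx_small, idx_large
-- ===== SOURCE B (Python) =====
-- from math import isqrt
--
-- def build_values_and_index(N: int):
--     root = isqrt(N)
--     # Distinct quotients via i = 1..root, unioned with 1..root, then one sort,
--     # instead of the jump-enumeration loop plus hand-written two-pointer merge.
--     vals = {N // i for i in range(1, root + 1)}
--     vals.update(range(1, root + 1))
--     values = sorted(vals, reverse=True)
--     idx_small = [0] * (root + 1)
--     idx_large = [0] * (root + 1)
--     for idx, v in enumerate(values):
--         if v <= root:
--             idx_small[v] = idx
--         else:
--             idx_large[N // v] = idx
--     return values, root, idx_small, idx_large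
-- ===== Notes on version B (the rewrite author's own statement) =====
-- stated objective: simpler
-- what changed: Replaces the jump-enumeration over all i<=N plus the hand-written two-pointer merge of two descending lists by building the distinct quotients from i=1..root as a set, unioning in range(1..root), and sorting once in reverse; the index-filling loop is unchanged.
import Mathlib
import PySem

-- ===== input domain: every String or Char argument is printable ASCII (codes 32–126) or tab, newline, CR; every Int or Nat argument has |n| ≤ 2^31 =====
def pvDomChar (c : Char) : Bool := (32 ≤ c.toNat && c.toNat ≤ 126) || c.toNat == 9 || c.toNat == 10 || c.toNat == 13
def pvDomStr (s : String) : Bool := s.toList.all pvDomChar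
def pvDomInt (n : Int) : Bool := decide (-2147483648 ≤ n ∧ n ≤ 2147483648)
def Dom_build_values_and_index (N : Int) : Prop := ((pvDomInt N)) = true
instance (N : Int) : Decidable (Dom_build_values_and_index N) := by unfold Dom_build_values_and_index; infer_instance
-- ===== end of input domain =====

-- B replaces A's jump-enumeration over all i ≤ N and its hand-written two-pointer merge by one
-- set of quotients for i = 1..root unioned with 1..root and a single reverse sort (simpler).

-- math.isqrt N; exact on nonnegative N (math.isqrt raises ValueError on negative N, excluded by Pre_)
def pvIsqrt (N : Int) : Int := (Nat.sqrt N.toNat : Int)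

-- the index-building loop, identical in both Pythons:
-- 'for idx, v in enumerate(values): if v <= root: idx_small[v] = idx else: idx_large[N//v] = idx'
def pvBuildIdx (N root : Int) (values : List Int) : List Int × List Int :=
  (PySem.List.enumerate values 0).foldl
    (fun st p =>
      if p.2 ≤ root then (PySem.List.pySetD st.1 p.2 p.1, st.2)
      else (st.1, PySem.List.pySetD st.2 (PySem.Int.floordiv N p.2) p.1))
    (List.replicate (root + 1).toNat 0, List.replicate (root + 1).toNat 0)

-- ===== PORT A =====
-- termination measure fact for the jump loop (cited by both decreasing_by blocks below)
theorem pvJump_lt (N i : Int) (h1 : i ≤ N) (h2 : 1 ≤ i) :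
    (N + 1 - (PySem.Int.floordiv N (PySem.Int.floordiv N i) + 1)).toNat < (N + 1 - i).toNat := by
  have hv : 1 ≤ PySem.Int.floordiv N i :=
    (PySem.Int.le_floordiv_iff_mul_le (by omega)).mpr (by omega)
  have hiv : i ≤ PySem.Int.floordiv N (PySem.Int.floordiv N i) :=
    (PySem.Int.le_floordiv_iff_mul_le (by omega)).mpr
      (by
        have := (PySem.Int.le_floordiv_iff_mul_le (a := N) (b := i)
          (q := PySem.Int.floordiv N i) (by omega)).mp (le_refl _)
        nlinarith)
  omega

-- 'while i <= N: v = N // i; large.append(v); i = N // v + 1'.  The '1 ≤ i' conjunct of the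
-- guard only makes termination provable; it holds on every reachable state (i starts at 1, N ≥ 0).
def pvLargeLoop (N : Int) (i : Int) (acc : List Int) : List Int :=
  if h : i ≤ N ∧ 1 ≤ i then
    let v := PySem.Int.floordiv N i
    pvLargeLoop N (PySem.Int.floordiv N v + 1) (acc ++ [v])
  else acc
termination_by (N + 1 - i).toNat
decreasing_by exact pvJump_lt N i h.1 h.2

-- the two-pointer merge of two descending lists (pointer pair rendered as structural recursion)
def pvMergeDesc : List Int → List Int → List Int
  | [], bs => bs
  | a :: as, [] => a :: as
  | a :: as, b :: bs =>
    if a > b then a :: pvMergeDesc as (b :: bs)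
    else if a < b then b :: pvMergeDesc (a :: as) bs
    else a :: pvMergeDesc as bs

def build_values_and_index (N : Int) : List Int × Int × List Int × List Int :=
  let root := pvIsqrt N
  let large := pvLargeLoop N 1 []
  let small := PySem.List.pyRange root 0 (-1)
  let values := pvMergeDesc large small
  let idx := pvBuildIdx N root values
  (values, root, idx.1, idx.2)

-- ===== PORT B =====
def build_values_and_index_alt (N : Int) : List Int × Int × List Int × List Int :=
  let root := pvIsqrt N
  let vals : PySem.Set Int :=
    PySem.Set.ofList ((PySem.List.pyRange 1 (root + 1) 1).map (fun i => PySem.Int.floordiv N i))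
  let vals := PySem.Set.update vals (PySem.List.pyRange 1 (root + 1) 1)
  let values := PySem.List.sorted vals (fun x => x) true
  let idx := pvBuildIdx N root values
  (values, root, idx.1, idx.2)

-- ===== PRECONDITION & SPEC =====
-- math.isqrt (hence A and B alike) raises ValueError on negative N; Pre_ admits exactly the nonnegative N.
def Pre_build_values_and_index (N : Int) : Prop := 0 ≤ N
instance (N : Int) : Decidable (Pre_build_values_and_index N) := by
  unfold Pre_build_values_and_index; infer_instance
def pvWitness_build_values_and_index : Int := (10)

def Spec_build_values_and_index (N : Int) (out : List Int × Int × List Int × List Int) : Prop :=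
  out = build_values_and_index_alt N
instance (N : Int) (out : List Int × Int × List Int × List Int) :
    Decidable (Spec_build_values_and_index N out) := by
  unfold Spec_build_values_and_index; infer_instance

-- ===== CLAIM (what is proved, stated in full; the proofs are below) =====
def Claim_equal_build_values_and_index : Prop :=
  ∀ (N : Int), Dom_build_values_and_index N → Pre_build_values_and_index N →
    Spec_build_values_and_index N (build_values_and_index N)

-- ===== LEMMAS AND PROOFS =====

theorem pvMergeDesc_mem (as bs : List Int) (x : Int) :
    x ∈ pvMergeDesc as bs ↔ x ∈ as ∨ x ∈ bs := by
  fun_induction pvMergeDesc as bs with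
  | case1 bs => simp
  | case2 a as => simp
  | case3 a as b bs hab ih => simp_all; tauto
  | case4 a as b bs hab hba ih => simp_all; tauto
  | case5 a as b bs hab hba ih =>
    have : a = b := by omega
    subst this
    simp_all
    tauto

theorem pvMergeDesc_pairwise (as bs : List Int)
    (ha : as.Pairwise (· > ·)) (hb : bs.Pairwise (· > ·)) :
    (pvMergeDesc as bs).Pairwise (· > ·) := by
  fun_induction pvMergeDesc as bs with
  | case1 bs => exact hb
  | case2 a as => exact ha
  | case3 a as b bs hab ih =>
    rw [List.pairwise_cons] at ha ⊢
    refine ⟨fun x hx => ?_, ih ha.2 hb⟩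
    rcases (pvMergeDesc_mem as (b :: bs) x).mp hx with h | h
    · exact ha.1 x h
    · rcases List.mem_cons.mp h with rfl | h
      · exact hab
      · exact lt_trans ((List.pairwise_cons.mp hb).1 x h) hab
  | case4 a as b bs hab hba ih =>
    rw [List.pairwise_cons] at hb ⊢
    refine ⟨fun x hx => ?_, ih ha hb.2⟩
    rcases (pvMergeDesc_mem (a :: as) bs x).mp hx with h | h
    · rcases List.mem_cons.mp h with rfl | h
      · exact hba
      · exact lt_trans ((List.pairwise_cons.mp ha).1 x h) hba
    · exact hb.1 x h
  | case5 a as b bs hab hba ih =>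
    have hba' : a = b := by omega
    subst hba'
    rw [List.pairwise_cons] at ha hb ⊢
    refine ⟨fun x hx => ?_, ih ha.2 hb.2⟩
    rcases (pvMergeDesc_mem as bs x).mp hx with h | h
    · exact ha.1 x h
    · exact hb.1 x h

theorem pvLargeLoop_append (N i : Int) (acc : List Int) :
    pvLargeLoop N i acc = acc ++ pvLargeLoop N i [] := by
  conv_lhs => rw [pvLargeLoop]
  conv_rhs => rw [pvLargeLoop]
  split_ifs with h
  · rw [pvLargeLoop_append N _ (acc ++ [PySem.Int.floordiv N i]),
        pvLargeLoop_append N _ ([] ++ [PySem.Int.floordiv N i])]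
    simp
  · simp
termination_by (N + 1 - i).toNat
decreasing_by all_goals exact pvJump_lt N i h.1 h.2

theorem pvLargeLoop_spec (N i : Int) (hN : 0 ≤ N) (hi : 1 ≤ i) :
    (pvLargeLoop N i []).Pairwise (· > ·) ∧
      ∀ x, x ∈ pvLargeLoop N i [] ↔ ∃ j, i ≤ j ∧ j ≤ N ∧ x = PySem.Int.floordiv N j := by
  by_cases h : i ≤ N
  case neg =>
    rw [pvLargeLoop, dif_neg (by omega)]
    refine ⟨List.Pairwise.nil, fun x => ?_⟩
    simp only [List.not_mem_nil, false_iff]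
    rintro ⟨j, h1, h2, _⟩; omega
  case pos =>
    set v := PySem.Int.floordiv N i with hv
    have hv1 : 1 ≤ v := (PySem.Int.le_floordiv_iff_mul_le (by omega)).mpr (by omega)
    have hvi : v * i ≤ N := (PySem.Int.le_floordiv_iff_mul_le (by omega)).mp (le_refl v)
    have hiv : i ≤ PySem.Int.floordiv N v :=
      (PySem.Int.le_floordiv_iff_mul_le (by omega)).mpr (by nlinarith)
    have key1 : ∀ j, i ≤ j → j ≤ PySem.Int.floordiv N v → PySem.Int.floordiv N j = v := by
      intro j h1 h2
      have hj0 : (0:Int) < j := by omega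
      have hjv : j * v ≤ N := (PySem.Int.le_floordiv_iff_mul_le (by omega)).mp h2
      have hle : v ≤ PySem.Int.floordiv N j :=
        (PySem.Int.le_floordiv_iff_mul_le hj0).mpr (by nlinarith)
      have hNi : N < (v + 1) * i :=
        (PySem.Int.floordiv_lt_iff_lt_mul (a := N) (b := i) (q := v + 1) (by omega)).mp (by omega)
      have hlt : PySem.Int.floordiv N j < v + 1 := by
        rw [PySem.Int.floordiv_lt_iff_lt_mul hj0]
        nlinarith
      omega
    have key2 : ∀ j, PySem.Int.floordiv N v < j → (0:Int) < j → PySem.Int.floordiv N j < v := by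
      intro j h1 h0
      rw [PySem.Int.floordiv_lt_iff_lt_mul h0]
      have := (PySem.Int.floordiv_lt_iff_lt_mul (a := N) (b := v) (q := j) (by omega)).mp h1
      nlinarith
    have ih := pvLargeLoop_spec N (PySem.Int.floordiv N v + 1) hN (by omega)
    rw [pvLargeLoop, dif_pos ⟨h, by omega⟩, ← hv, pvLargeLoop_append]
    simp only [List.nil_append, List.singleton_append]
    constructor
    · rw [List.pairwise_cons]
      refine ⟨fun x hx => ?_, ih.1⟩
      rcases (ih.2 x).mp hx with ⟨j, hj1, hj2, rfl⟩
      exact key2 j (by omega) (by omega)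
    · intro x
      rw [List.mem_cons, ih.2 x]
      constructor
      · rintro (rfl | ⟨j, hj1, hj2, rfl⟩)
        · exact ⟨i, le_refl i, h, hv⟩
        · exact ⟨j, by omega, hj2, rfl⟩
      · rintro ⟨j, hj1, hj2, rfl⟩
        by_cases hjle : j ≤ PySem.Int.floordiv N v
        · left; exact key1 j hj1 hjle
        · right; exact ⟨j, by omega, hj2, rfl⟩
termination_by (N + 1 - i).toNat
decreasing_by exact pvJump_lt N i h hi

theorem pvValues_eq (N : Int) (hN : 0 ≤ N) :
    pvMergeDesc (pvLargeLoop N 1 []) (PySem.List.pyRange (pvIsqrt N) 0 (-1)) =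
      PySem.List.sorted
        (PySem.Set.update
          (PySem.Set.ofList ((PySem.List.pyRange 1 (pvIsqrt N + 1) 1).map
            (fun i => PySem.Int.floordiv N i)))
          (PySem.List.pyRange 1 (pvIsqrt N + 1) 1))
        (fun x => x) true := by
  have hroot0 : (0:Int) ≤ pvIsqrt N := Int.natCast_nonneg _
  have hNcast : ((N.toNat : Int)) = N := Int.toNat_of_nonneg hN
  have hsq : pvIsqrt N * pvIsqrt N ≤ N := by
    have h1 : N.toNat.sqrt * N.toNat.sqrt ≤ N.toNat := by
      simpa [pow_two] using Nat.sqrt_le' N.toNat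
    unfold pvIsqrt; rw [← hNcast]; exact_mod_cast h1
  have hsq2 : N < (pvIsqrt N + 1) * (pvIsqrt N + 1) := by
    have h2 : N.toNat < (N.toNat.sqrt + 1) * (N.toNat.sqrt + 1) := by
      simpa [pow_two, Nat.succ_eq_add_one] using Nat.lt_succ_sqrt' N.toNat
    unfold pvIsqrt; rw [← hNcast]; exact_mod_cast h2
  have hspec := pvLargeLoop_spec N 1 hN (le_refl 1)
  have hsmall_pw : (PySem.List.pyRange (pvIsqrt N) 0 (-1)).Pairwise (· > ·) := by
    rw [PySem.List.pyRange_neg_one_eq_reverse]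
    rw [List.pairwise_reverse]
    exact PySem.List.pairwise_lt_pyRange_one _ _
  have hmerge_pw := pvMergeDesc_pairwise _ _ hspec.1 hsmall_pw
  have hmerge_nd : (pvMergeDesc (pvLargeLoop N 1 []) (PySem.List.pyRange (pvIsqrt N) 0 (-1))).Nodup :=
    hmerge_pw.imp (fun h => ne_of_gt h)
  have hset_nd :
      (PySem.Set.update
        (PySem.Set.ofList ((PySem.List.pyRange 1 (pvIsqrt N + 1) 1).map
          (fun i => PySem.Int.floordiv N i)))
        (PySem.List.pyRange 1 (pvIsqrt N + 1) 1)).Nodup :=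
    PySem.Set.nodup_update _ _ (PySem.Set.nodup_ofList _)
  have hmem : ∀ x,
      x ∈ pvMergeDesc (pvLargeLoop N 1 []) (PySem.List.pyRange (pvIsqrt N) 0 (-1)) ↔
      x ∈ PySem.Set.update
        (PySem.Set.ofList ((PySem.List.pyRange 1 (pvIsqrt N + 1) 1).map
          (fun i => PySem.Int.floordiv N i)))
        (PySem.List.pyRange 1 (pvIsqrt N + 1) 1) := by
    intro x
    rw [pvMergeDesc_mem, PySem.Set.mem_update, PySem.Set.mem_ofList, hspec.2 x,
        PySem.List.mem_pyRange_neg_one, PySem.List.mem_pyRange_one, List.mem_map]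
    simp only [PySem.List.mem_pyRange_one]
    constructor
    · rintro (⟨j, hj1, hj2, rfl⟩ | ⟨hx1, hx2⟩)
      · by_cases hjr : j ≤ pvIsqrt N
        · exact Or.inl ⟨j, ⟨hj1, by omega⟩, rfl⟩
        · refine Or.inr ⟨?_, ?_⟩
          · exact (PySem.Int.le_floordiv_iff_mul_le (by omega)).mpr (by omega)
          · have : PySem.Int.floordiv N j < pvIsqrt N + 1 := by
              rw [PySem.Int.floordiv_lt_iff_lt_mul (by omega)]
              nlinarith
            omega
      · exact Or.inr ⟨by omega, by omega⟩
    · rintro (⟨i, ⟨hi1, hi2⟩, rfl⟩ | ⟨hx1, hx2⟩)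
      · have hiN : i ≤ N := by nlinarith
        exact Or.inl ⟨i, hi1, hiN, rfl⟩
      · exact Or.inr ⟨by omega, by omega⟩
  have hperm :
      (pvMergeDesc (pvLargeLoop N 1 []) (PySem.List.pyRange (pvIsqrt N) 0 (-1))).Perm
        (PySem.Set.update
          (PySem.Set.ofList ((PySem.List.pyRange 1 (pvIsqrt N + 1) 1).map
            (fun i => PySem.Int.floordiv N i)))
          (PySem.List.pyRange 1 (pvIsqrt N + 1) 1)) :=
    (List.perm_ext_iff_of_nodup hmerge_nd hset_nd).mpr hmem
  exact (PySem.List.sorted_rev_eq_of_perm_of_pairwise_gt _ _ (fun x => x) hperm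
    (hmerge_pw.imp (fun h => h))).symm

-- ===== VERDICT (by name: the statement is the Claim_ definition above) =====
theorem build_values_and_index_spec : Claim_equal_build_values_and_index := by
  intro N _ hPre
  unfold Spec_build_values_and_index build_values_and_index build_values_and_index_alt
  dsimp only
  rw [pvValues_eq N hPre]
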